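-- pv_equiv track=rewrite | github.com/arksomething/gpt | scripts/filters.py | strip_wiki_sections
-- ===== SOURCE A (Python) =====
-- from typing import List, Optional, Set, Tuple
--
-- WIKI_REMOVE_SECTIONS = [
--     "references",
--     "external links",
--     "see also",
--     "further reading",
--     "notes",
--     "bibliography",
--     "sources",
--     "citations",
-- ]
--
-- def strip_wiki_sections(text: str, sections_to_remove: Optional[List[str]] = None) -> str:
--     """
--     W0: Remove non-prose sections from Wikipedia text.
--     Removes sections starting with certain headers until next section or end.
--     """
--     if sections_to_remove is None:
--         sections_to_remove = WIKI_REMOVE_SECTIONS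
--
--     lines = text.split("\n")
--     result_lines = []
--     skip_until_next_section = False
--
--     for line in lines:
--         stripped = line.strip().lower()
--         # Check if this is a section header to remove
--         # Wikipedia section headers are often "== Section ==" format
--         is_section_header = stripped.startswith("==") or stripped.endswith("==")
--
--         if is_section_header:
--             # Extract section name
--             section_name = stripped.strip("= ").lower()
--             if any(remove_sec in section_name for remove_sec in sections_to_remove):
--                 skip_until_next_section = True
--                 continue
--             else:
--                 skip_until_next_section = False
--
--         if not skip_until_next_section:
--             result_lines.append(line)
--
--     return "\n".join(result_lines)
-- ===== SOURCE B (Python) =====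
-- from typing import List, Optional
--
-- WIKI_REMOVE_SECTIONS = [
--     "references",
--     "external links",
--     "see also",
--     "further reading",
--     "notes",
--     "bibliography",
--     "sources",
--     "citations",
-- ]
--
--
-- def strip_wiki_sections(text: str, sections_to_remove: Optional[List[str]] = None) -> str:
--     """Segment-based rewrite: group lines into header-led segments, keep or drop
--     each whole segment by its header alone."""
--     if sections_to_remove is None:
--         sections_to_remove = WIKI_REMOVE_SECTIONS
--
--     def is_header(line: str) -> bool:
--         s = line.strip().lower()
--         return s.startswith("==") or s.endswith("==")
--
--     def dropped(header: str) -> bool: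
--         name = header.strip().lower().strip("= ")
--         return any(sec in name for sec in sections_to_remove)
--
--     lines = text.split("\n")
--     n = len(lines)
--     kept: List[str] = []
--
--     # leading block before the first header is always kept
--     i = 0
--     while i < n and not is_header(lines[i]):
--         kept.append(lines[i])
--         i += 1
--
--     # each remaining segment: a header line plus the non-header lines after it
--     while i < n:
--         j = i + 1
--         while j < n and not is_header(lines[j]):
--             j += 1
--         if not dropped(lines[i]):
--             kept.extend(lines[i:j])
--         i = j
--
--     return "\n".join(kept)
-- ===== Notes on version B (the rewrite author's own statement) =====
-- stated objective: alternative
-- what changed: Replaces A's single pass with a carried skip flag by a segment decomposition: a two-pointer scan groups the lines into a leading block plus header-led segments, and each segment is kept or dropped wholesale from its header alone.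
import Mathlib
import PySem

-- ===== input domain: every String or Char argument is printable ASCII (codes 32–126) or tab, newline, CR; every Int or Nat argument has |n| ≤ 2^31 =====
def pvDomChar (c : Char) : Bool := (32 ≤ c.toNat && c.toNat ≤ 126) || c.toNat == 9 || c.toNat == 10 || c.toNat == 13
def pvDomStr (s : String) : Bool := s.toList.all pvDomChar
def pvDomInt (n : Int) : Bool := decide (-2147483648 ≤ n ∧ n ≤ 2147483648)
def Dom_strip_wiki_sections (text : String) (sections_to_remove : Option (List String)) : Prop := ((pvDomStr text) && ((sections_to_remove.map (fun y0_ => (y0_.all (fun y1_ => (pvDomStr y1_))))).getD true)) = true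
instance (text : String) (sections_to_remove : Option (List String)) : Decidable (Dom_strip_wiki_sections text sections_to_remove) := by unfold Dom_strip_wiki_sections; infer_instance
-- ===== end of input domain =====

-- B replaces A's single pass with a skip flag by a two-pointer segment grouping
-- (leading block + header-led segments, each kept or dropped wholesale); same
-- cost, different decomposition ("alternative").

def pvWikiRemoveSections : List String :=
  ["references", "external links", "see also", "further reading",
   "notes", "bibliography", "sources", "citations"]

-- ===== PORT A =====
-- the body of A's for-loop, acting on the state (skip_until_next_section, result_lines)
def pvStepA (secs : List String) (st : Bool × List (List Char)) (line : List Char) :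
    Bool × List (List Char) :=
  let stripped := PySem.Chars.lower (PySem.Chars.strip line)
  let isHeader := PySem.Chars.startswith stripped "==".toList ||
                  PySem.Chars.endswith stripped "==".toList
  if isHeader then
    let name := PySem.Chars.lower (PySem.Chars.stripChars stripped "= ".toList)
    if secs.any (fun r => PySem.Chars.isIn r.toList name) then (true, st.2)
    else (false, st.2 ++ [line])
  else if st.1 then st
  else (st.1, st.2 ++ [line])

def strip_wiki_sections (text : String) (sections_to_remove : Option (List String)) : String :=
  let secs := sections_to_remove.getD pvWikiRemoveSections
  let lines := PySem.Chars.splitOn text.toList "\n".toList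
  String.ofList (PySem.Chars.join "\n".toList ((lines.foldl (pvStepA secs) (false, [])).2))

-- ===== PORT B =====
def pvIsHeader (line : List Char) : Bool :=
  let s := PySem.Chars.lower (PySem.Chars.strip line)
  PySem.Chars.startswith s "==".toList || PySem.Chars.endswith s "==".toList

def pvDropped (secs : List String) (header : List Char) : Bool :=
  let name := PySem.Chars.stripChars (PySem.Chars.lower (PySem.Chars.strip header)) "= ".toList
  secs.any (fun sec => PySem.Chars.isIn sec.toList name)

-- Source B's outer while loop: each iteration takes one header-led segment
-- (the inner 'while j' scan of non-header lines is takeWhile/dropWhile)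
def pvSegs (secs : List String) : List (List Char) → List (List Char)
  | [] => []
  | h :: rest =>
      (if pvDropped secs h then [] else h :: rest.takeWhile (fun l => !pvIsHeader l)) ++
        pvSegs secs (rest.dropWhile (fun l => !pvIsHeader l))
  termination_by ls => ls.length
  decreasing_by
    simp only [List.length_cons]
    exact Nat.lt_succ_of_le (List.length_dropWhile_le _ _)

def strip_wiki_sections_alt (text : String) (sections_to_remove : Option (List String)) : String :=
  let secs := sections_to_remove.getD pvWikiRemoveSections
  let lines := PySem.Chars.splitOn text.toList "\n".toList
  -- the first while loop: the always-kept leading block of non-header lines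
  let pre := lines.takeWhile (fun l => !pvIsHeader l)
  let rest := lines.dropWhile (fun l => !pvIsHeader l)
  String.ofList (PySem.Chars.join "\n".toList (pre ++ pvSegs secs rest))

-- ===== PRECONDITION & SPEC =====
def Spec_strip_wiki_sections (text : String) (sections_to_remove : Option (List String)) (out : String) : Prop := out = strip_wiki_sections_alt text sections_to_remove
instance (text : String) (sections_to_remove : Option (List String)) (out : String) : Decidable (Spec_strip_wiki_sections text sections_to_remove out) := by unfold Spec_strip_wiki_sections; infer_instance

-- ===== CLAIM (what is proved, stated in full; the proofs are below) =====
def Claim_equal_strip_wiki_sections : Prop := ∀ (text : String) (sections_to_remove : Option (List String)), Dom_strip_wiki_sections text sections_to_remove → Spec_strip_wiki_sections text sections_to_remove (strip_wiki_sections text sections_to_remove)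

-- ===== LEMMAS AND PROOFS =====

-- Python's str.lower is idempotent characterwise
lemma pv_lowerChar_idem (c : Char) :
    PySem.Chars.lowerChar (PySem.Chars.lowerChar c) = PySem.Chars.lowerChar c := by
  simp only [PySem.Chars.lowerChar, PySem.Chars.isupper]
  split_ifs with h h2 <;> try rfl
  exfalso
  simp only [Bool.and_eq_true, decide_eq_true_eq, Char.le_def, UInt32.le_iff_toNat_le] at h h2
  have hA : ('A').val.toNat = 65 := by decide
  have hZ : ('Z').val.toNat = 90 := by decide
  have hc : c.toNat = c.val.toNat := rfl
  have hv : Nat.isValidChar (c.toNat + 32) := Or.inl (by omega)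
  have hofn : (Char.ofNat (c.toNat + 32)).toNat = c.toNat + 32 := by
    rw [Char.toNat_ofNat, if_pos hv]
  have hx : (Char.ofNat (c.toNat + 32)).val.toNat = (Char.ofNat (c.toNat + 32)).toNat := rfl
  omega

lemma pv_mem_stripChars (cs t : List Char) :
    ∀ x ∈ PySem.Chars.stripChars cs t, x ∈ cs := by
  intro x hx
  simp only [PySem.Chars.stripChars] at hx
  rw [List.mem_reverse] at hx
  have := (List.dropWhile_sublist _).mem hx
  rw [List.mem_reverse] at this
  exact (List.dropWhile_sublist _).mem this

-- the redundant second .lower() in A's section-name extraction is the identity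
lemma pv_lower_stripChars_lower (cs t : List Char) :
    PySem.Chars.lower (PySem.Chars.stripChars (PySem.Chars.lower cs) t) =
      PySem.Chars.stripChars (PySem.Chars.lower cs) t := by
  have hfix : ∀ x ∈ PySem.Chars.stripChars (PySem.Chars.lower cs) t,
      PySem.Chars.lowerChar x = x := by
    intro x hx
    have hx' : x ∈ PySem.Chars.lower cs := pv_mem_stripChars _ _ x hx
    simp only [PySem.Chars.lower, List.mem_map] at hx'
    obtain ⟨y, -, rfl⟩ := hx'
    exact pv_lowerChar_idem y
  simp only [PySem.Chars.lower]
  calc (PySem.Chars.stripChars (List.map PySem.Chars.lowerChar cs) t).map PySem.Chars.lowerChar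
      = (PySem.Chars.stripChars (List.map PySem.Chars.lowerChar cs) t).map id := by
        exact List.map_congr_left (by simpa [PySem.Chars.lower] using hfix)
    _ = _ := List.map_id _

-- A's loop body, written with B's header/drop predicates
lemma pv_stepA_eq (secs : List String) (st : Bool × List (List Char)) (line : List Char) :
    pvStepA secs st line =
      (if pvIsHeader line then
        (if pvDropped secs line then (true, st.2) else (false, st.2 ++ [line]))
      else if st.1 then st else (st.1, st.2 ++ [line])) := by
  simp only [pvStepA, pvIsHeader, pvDropped, pv_lower_stripChars_lower]
  rfl

-- A's loop from state `skip` with an empty accumulator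
def pvGoA (secs : List String) : Bool → List (List Char) → List (List Char)
  | _, [] => []
  | skip, l :: ls =>
      if pvIsHeader l then
        (if pvDropped secs l then pvGoA secs true ls else l :: pvGoA secs false ls)
      else if skip then pvGoA secs skip ls
      else l :: pvGoA secs skip ls

lemma pv_foldA (secs : List String) :
    ∀ (ls : List (List Char)) (skip : Bool) (acc : List (List Char)),
      (ls.foldl (pvStepA secs) (skip, acc)).2 = acc ++ pvGoA secs skip ls := by
  intro ls
  induction ls with
  | nil => intro skip acc; simp [pvGoA]
  | cons l ls ih =>
    intro skip acc
    rw [List.foldl_cons, pv_stepA_eq]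
    by_cases hh : pvIsHeader l
    · by_cases hr : pvDropped secs l <;> simp [pvGoA, hh, hr, ih]
    · cases skip <;> simp [pvGoA, hh, ih]

lemma pv_goA_eq (secs : List String) :
    ∀ ls : List (List Char),
      pvGoA secs true ls = pvSegs secs (ls.dropWhile (fun l => !pvIsHeader l)) ∧
      pvGoA secs false ls =
        ls.takeWhile (fun l => !pvIsHeader l) ++
          pvSegs secs (ls.dropWhile (fun l => !pvIsHeader l)) := by
  intro ls
  induction ls with
  | nil => simp [pvGoA, pvSegs]
  | cons l ls ih =>
    by_cases hh : pvIsHeader l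
    · have hd : List.dropWhile (fun l => !pvIsHeader l) (l :: ls) = l :: ls := by
        simp [hh]
      have ht : List.takeWhile (fun l => !pvIsHeader l) (l :: ls) = [] := by
        simp [hh]
      rw [hd, ht]
      have hs : pvSegs secs (l :: ls) =
          (if pvDropped secs l then [] else l :: ls.takeWhile (fun l => !pvIsHeader l)) ++
            pvSegs secs (ls.dropWhile (fun l => !pvIsHeader l)) := by
        rw [pvSegs]
      constructor <;>
      · by_cases hr : pvDropped secs l <;> simp [pvGoA, hh, hr, hs, ih.1, ih.2]
    · have hd : List.dropWhile (fun l => !pvIsHeader l) (l :: ls) =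
          List.dropWhile (fun l => !pvIsHeader l) ls := by
        simp [hh]
      have ht : List.takeWhile (fun l => !pvIsHeader l) (l :: ls) =
          l :: List.takeWhile (fun l => !pvIsHeader l) ls := by
        simp [hh]
      rw [hd, ht]
      constructor <;> simp [pvGoA, hh, ih.1, ih.2]

-- ===== VERDICT (by name: the statement is the Claim_ definition above) =====
theorem strip_wiki_sections_spec : Claim_equal_strip_wiki_sections := by
  intro text sections_to_remove _
  unfold Spec_strip_wiki_sections
  simp only [strip_wiki_sections, strip_wiki_sections_alt]
  rw [pv_foldA, (pv_goA_eq _ _).2, List.nil_append]
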